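-- pv_equiv track=rewrite | github.com/Tulay-Kahel/Tulay-Kahel-Project | TK_API_DB/utils/authenticator.py | password_decrypter
-- ===== SOURCE A (Python) =====
-- def password_decrypter(password: str):
--     # NOTE: Password decryption procedures are pseudo-implementation only, this will be finalized in the future
--     # Uses RSA encryption
--     private_key = (2753, 323)
--
--     decrypted_chars = []
--     for char in password:
--         decrypted_char = chr((ord(char) ** private_key[0]) % private_key[1])
--         decrypted_chars.append(decrypted_char)
--     decrypted_password = "".join(decrypted_chars)
--
--     # Return the decrypted password
--     return decrypted_password
-- ===== SOURCE B (Python) =====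
-- def _crt_dec(o):
--     # 323 = 17 * 19.  By Fermat: o**2753 % 17 == o % 17 (2753 % 16 == 1)
--     # and o**2753 % 19 == o**17 % 19 (2753 % 18 == 17); both hold for all o >= 0.
--     a = o % 17
--     b = o % 19
--     t = b
--     for _ in range(4):
--         t = t * t % 19          # t = b**16 % 19
--     b = t * b % 19              # b = o**17 % 19
--     # CRT recombination: 171 = 19*inv(19,17), 153 = 17*inv(17,19)
--     return chr((171 * a + 153 * b) % 323)
--
-- def password_decrypter(password: str):
--     return "".join(_crt_dec(ord(c)) for c in password)
-- ===== Notes on version B (the rewrite author's own statement) =====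
-- stated objective: faster
-- what changed: B replaces A's direct big-integer ord(c)**2753 % 323 with number theory: it splits the modulus 323 = 17*19, reduces the exponent by Fermat's little theorem (x^2753 = x mod 17 and x^17 mod 19), computes x^17 mod 19 by four explicit modular squarings, and recombines the residues with fixed CRT coefficients.
import Mathlib
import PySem

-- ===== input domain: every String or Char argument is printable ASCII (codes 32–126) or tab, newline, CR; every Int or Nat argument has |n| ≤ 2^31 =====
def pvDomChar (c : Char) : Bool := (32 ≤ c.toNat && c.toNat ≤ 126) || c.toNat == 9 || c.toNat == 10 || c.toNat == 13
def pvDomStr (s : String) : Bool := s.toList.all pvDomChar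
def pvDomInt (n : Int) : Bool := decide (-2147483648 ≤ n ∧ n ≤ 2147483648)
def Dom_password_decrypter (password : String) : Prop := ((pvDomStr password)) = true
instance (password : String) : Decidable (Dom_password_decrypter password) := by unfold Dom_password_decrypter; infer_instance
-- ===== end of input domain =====

-- B computes each character by CRT over 323 = 17*19 with Fermat exponent reduction and
-- explicit modular squarings, instead of A's big-integer ord(c)**2753 % 323 (objective: faster
-- by a constant factor, as measured).

-- ===== PORT A =====
-- chr(n) for 0 ≤ n < 0x110000 is exactly Char.ofNat n; ord(c) is c.toNat (exact on this domain).
def password_decrypter (password : String) : String :=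
  let private_key : Nat × Int := (2753, 323)
  let decrypted_chars : List String :=
    password.toList.foldl
      (fun acc char =>
        acc ++ [String.ofList [Char.ofNat ((PySem.Int.mod ((char.toNat : Int) ^ private_key.1) private_key.2)).toNat]])
      []
  PySem.Str.join "" decrypted_chars

-- ===== PORT B =====
-- _crt_dec: Fermat reduction (o^2753 ≡ o mod 17, ≡ o^17 mod 19), o^17 mod 19 by four
-- squarings in a range(4) loop, then fixed-coefficient CRT recombination — Source B step for step.
def pvCrtDec (o : Int) : Char :=
  let a := PySem.Int.mod o 17
  let b := PySem.Int.mod o 19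
  let t := (PySem.List.pyRange 0 4 1).foldl (fun t _ => PySem.Int.mod (t * t) 19) b
  let b := PySem.Int.mod (t * b) 19
  Char.ofNat (PySem.Int.mod (171 * a + 153 * b) 323).toNat

def password_decrypter_alt (password : String) : String :=
  PySem.Str.join "" (password.toList.map (fun c => String.ofList [pvCrtDec (c.toNat : Int)]))

-- ===== PRECONDITION & SPEC =====
def Spec_password_decrypter (password : String) (out : String) : Prop := out = password_decrypter_alt password
instance (password : String) (out : String) : Decidable (Spec_password_decrypter password out) := by unfold Spec_password_decrypter; infer_instance

-- ===== CLAIM (what is proved, stated in full; the proofs are below) =====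
def Claim_equal_password_decrypter : Prop := ∀ (password : String), Dom_password_decrypter password → Spec_password_decrypter password (password_decrypter password)

-- ===== LEMMAS AND PROOFS =====
-- The per-character maps agree on every code point a Dom string can contain (0 ≤ n < 127);
-- a finite check the kernel evaluates directly.
set_option maxRecDepth 100000 in
theorem pvCharwise : ∀ n : Nat, n < 127 →
    Char.ofNat ((PySem.Int.mod ((n : Int) ^ 2753) 323).toNat) = pvCrtDec (n : Int) := by
  decide

theorem password_decrypter_eq_alt (password : String)
    (h : Dom_password_decrypter password) :
    password_decrypter password = password_decrypter_alt password := by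
  unfold password_decrypter password_decrypter_alt
  simp only [PySem.List.foldl_append_singleton_eq_map, List.nil_append]
  congr 1
  apply List.map_congr_left
  intro c hc
  have hd : pvDomChar c = true := by
    have := (List.all_eq_true.mp h) c hc
    exact this
  have hlt : c.toNat < 127 := by
    simp only [pvDomChar, Bool.or_eq_true, Bool.and_eq_true, decide_eq_true_eq, beq_iff_eq] at hd
    omega
  rw [pvCharwise c.toNat hlt]

-- ===== VERDICT (by name: the statement is the Claim_ definition above) =====
theorem password_decrypter_spec : Claim_equal_password_decrypter := by
  intro password h
  unfold Spec_password_decrypter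
  exact password_decrypter_eq_alt password h
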